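-- pv_equiv track=rewrite | github.com/fedebosack-iresm/ayed1-iresm | Unidad_4/ejercicio4.3.py | comparador_de_palabras
-- ===== SOURCE A (Python) =====
-- def comparador_de_palabras(palabra_1,palabra_2):
--     contador_1=0
--     contador_2=0
--     for i in palabra_1:
--         if i != " ":
--             contador_1+=1
--         else:
--             contador_1 = -1
--             break
--
--     for i in palabra_2:
--         if i!=" ":
--             contador_2+=1
--         else:
--             contador_2=-1
--             break
--
--     if contador_1 == -1 or contador_2 == -1:
--         return "Se ha ingresado una frase"
--     elif contador_1>contador_2:
--         return "La palabra 1 tiene más letras"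
--     elif contador_1==contador_2:
--         return "Las palabras tienen la misma cantidad de letras"
--     else:
--         return "La palabra 2 tiene más letras"
-- ===== SOURCE B (Python) =====
-- def comparador_de_palabras(palabra_1, palabra_2):
--     if " " in palabra_1 or " " in palabra_2:
--         return "Se ha ingresado una frase"
--     l1 = len(palabra_1)
--     l2 = len(palabra_2)
--     if l1 > l2:
--         return "La palabra 1 tiene más letras"
--     elif l1 == l2:
--         return "Las palabras tienen la misma cantidad de letras"
--     else:
--         return "La palabra 2 tiene más letras"
-- ===== Notes on version B (the rewrite author's own statement) =====
-- stated objective: simpler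
-- what changed: Replaces the two counting loops with an early break by a direct substring test for a space plus a comparison of the two lengths, since the running count only matters as 'contains a space -> phrase'.
import Mathlib
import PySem

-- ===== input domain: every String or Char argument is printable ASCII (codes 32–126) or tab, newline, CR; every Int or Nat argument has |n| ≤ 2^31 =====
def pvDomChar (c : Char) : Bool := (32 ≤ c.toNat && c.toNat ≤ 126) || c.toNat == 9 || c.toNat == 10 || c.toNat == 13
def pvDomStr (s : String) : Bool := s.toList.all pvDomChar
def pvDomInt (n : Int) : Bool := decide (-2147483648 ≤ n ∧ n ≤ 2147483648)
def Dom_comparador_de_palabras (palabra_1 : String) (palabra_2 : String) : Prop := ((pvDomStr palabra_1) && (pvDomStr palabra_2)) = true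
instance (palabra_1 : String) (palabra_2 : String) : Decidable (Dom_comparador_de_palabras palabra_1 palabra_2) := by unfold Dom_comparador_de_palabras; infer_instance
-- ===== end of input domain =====

-- B replaces A's two counting loops (with break-on-space) by a substring test for " " plus a length comparison: simpler, same cost.

-- ===== PORT A =====
-- the for-loop with counter and break, as structural recursion over the characters
def pvCountLoop (acc : Int) : List Char → Int
  | [] => acc
  | c :: rest => if c ≠ ' ' then pvCountLoop (acc + 1) rest else -1

def comparador_de_palabras (palabra_1 : String) (palabra_2 : String) : String :=
  let contador_1 := pvCountLoop 0 palabra_1.toList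
  let contador_2 := pvCountLoop 0 palabra_2.toList
  if contador_1 == -1 || contador_2 == -1 then "Se ha ingresado una frase"
  else if contador_1 > contador_2 then "La palabra 1 tiene más letras"
  else if contador_1 == contador_2 then "Las palabras tienen la misma cantidad de letras"
  else "La palabra 2 tiene más letras"

-- ===== PORT B =====
def comparador_de_palabras_alt (palabra_1 : String) (palabra_2 : String) : String :=
  if PySem.Str.isIn " " palabra_1 || PySem.Str.isIn " " palabra_2 then "Se ha ingresado una frase"
  else
    let l1 := PySem.Str.len palabra_1
    let l2 := PySem.Str.len palabra_2
    if l1 > l2 then "La palabra 1 tiene más letras"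
    else if l1 == l2 then "Las palabras tienen la misma cantidad de letras"
    else "La palabra 2 tiene más letras"

-- ===== PRECONDITION & SPEC =====
def Spec_comparador_de_palabras (palabra_1 : String) (palabra_2 : String) (out : String) : Prop := out = comparador_de_palabras_alt palabra_1 palabra_2
instance (palabra_1 : String) (palabra_2 : String) (out : String) : Decidable (Spec_comparador_de_palabras palabra_1 palabra_2 out) := by unfold Spec_comparador_de_palabras; infer_instance

-- ===== CLAIM (what is proved, stated in full; the proofs are below) =====
def Claim_equal_comparador_de_palabras : Prop := ∀ (palabra_1 : String) (palabra_2 : String), Dom_comparador_de_palabras palabra_1 palabra_2 → Spec_comparador_de_palabras palabra_1 palabra_2 (comparador_de_palabras palabra_1 palabra_2)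

-- ===== LEMMAS AND PROOFS =====
theorem pvCountLoop_char : ∀ (l : List Char) (acc : Int),
    pvCountLoop acc l = if ' ' ∈ l then -1 else acc + l.length := by
  intro l
  induction l with
  | nil => intro acc; simp [pvCountLoop]
  | cons c rest ih =>
    intro acc
    by_cases hc : c = ' '
    · subst hc; simp [pvCountLoop]
    · have h' : ¬ (' ' = c) := fun h => hc h.symm
      rw [show pvCountLoop acc (c :: rest) = pvCountLoop (acc + 1) rest from by
        simp [pvCountLoop, hc], ih]
      by_cases hr : ' ' ∈ rest <;> simp [hr, h'] <;> omega

theorem pv_singleton_infix : ∀ (c : Char) (l : List Char), [c] <:+: l ↔ c ∈ l := by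
  intro c l
  constructor
  · intro h; exact h.mem (List.mem_singleton_self c)
  · intro h
    obtain ⟨pre, suf, hps⟩ := List.append_of_mem h
    exact ⟨pre, suf, by simp [hps]⟩

theorem pv_isIn_space (s : String) : PySem.Str.isIn " " s = true ↔ ' ' ∈ s.toList := by
  rw [PySem.Str.isIn_iff_infix]
  exact pv_singleton_infix ' ' s.toList

-- ===== VERDICT (by name: the statement is the Claim_ definition above) =====
theorem comparador_de_palabras_spec : Claim_equal_comparador_de_palabras := by
  intro p1 p2 _
  unfold Spec_comparador_de_palabras comparador_de_palabras comparador_de_palabras_alt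
  rw [pvCountLoop_char, pvCountLoop_char]
  by_cases h1 : ' ' ∈ p1.toList <;> by_cases h2 : ' ' ∈ p2.toList
  · simp [h1]
    intro hf _
    exact absurd ((pv_singleton_infix ' ' p1.toList).2 h1) ((PySem.Chars.isIn_eq_false_iff _ _).1 hf)
  · simp [h1]
    intro hf _
    exact absurd ((pv_singleton_infix ' ' p1.toList).2 h1) ((PySem.Chars.isIn_eq_false_iff _ _).1 hf)
  · simp [h2]
    intro _ hf
    exact absurd ((pv_singleton_infix ' ' p2.toList).2 h2) ((PySem.Chars.isIn_eq_false_iff _ _).1 hf)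
  · have b1 : PySem.Str.isIn " " p1 = false := by
      cases hv : PySem.Str.isIn " " p1
      · rfl
      · exact absurd ((pv_isIn_space p1).1 hv) h1
    have b2 : PySem.Str.isIn " " p2 = false := by
      cases hv : PySem.Str.isIn " " p2
      · rfl
      · exact absurd ((pv_isIn_space p2).1 hv) h2
    have hne1 : ((p1.toList.length : Int) == -1) = false := by simp
    have hne2 : ((p2.toList.length : Int) == -1) = false := by simp
    simp only [if_neg h1, if_neg h2, b1, b2, if_neg Bool.false_ne_true,
      PySem.Str.len_eq, zero_add, hne1, hne2, Bool.or_self]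
    rfl
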